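-- pv_equiv track=rewrite | github.com/bahadir-bakla/musicmath | scripts/brute_force_patterns.py | p44_modal_skala
-- ===== SOURCE A (Python) =====
-- def p44_modal_skala(n, mod="dorian"):
--     """Modal skala aralıkları (semitone)
--     Armoni: Farklı karakterler → müzikal renk paleti"""
--     modlar = {
--         "ionian":     [0, 2, 4, 5, 7, 9, 11],
--         "dorian":     [0, 2, 3, 5, 7, 9, 10],
--         "phrygian":   [0, 1, 3, 5, 7, 8, 10],
--         "lydian":     [0, 2, 4, 6, 7, 9, 11],
--         "mixolydian": [0, 2, 4, 5, 7, 9, 10],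
--         "aeolian":    [0, 2, 3, 5, 7, 8, 10],
--         "locrian":    [0, 1, 3, 5, 6, 8, 10],
--     }
--     scale = modlar.get(mod, modlar["dorian"])
--     for i in range(n):
--         oktav = i // len(scale)
--         yield scale[i % len(scale)] + 12 * oktav
-- ===== SOURCE B (Python) =====
-- def p44_modal_skala(n, mod="dorian"):
--     """Modal skala aralıkları (semitone) — running-interval-sum algorithm:
--     every mode is a rotation of the major step pattern [2,2,1,2,2,2,1], so we
--     keep a running semitone sum and cycle a pointer through the step pattern;
--     no scale table, no per-element // or %."""
--     starts = {
--         "ionian": 0, "dorian": 1, "phrygian": 2, "lydian": 3,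
--         "mixolydian": 4, "aeolian": 5, "locrian": 6,
--     }
--     steps = [2, 2, 1, 2, 2, 2, 1]
--     j = starts.get(mod, 1)
--     v = 0
--     count = 0
--     while count < n:
--         yield v
--         v += steps[j]
--         j += 1
--         if j == 7:
--             j = 0
--         count += 1
-- ===== Notes on version B (the rewrite author's own statement) =====
-- stated objective: alternative
-- what changed: Replaces the scale-table lookup with per-element floor-division and modulo by a running-interval-sum algorithm: every mode is a rotation of the major step pattern [2,2,1,2,2,2,1], so B keeps a running semitone sum and a cyclic pointer into that pattern, with no scale lists and no // or % per element.
import Mathlib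
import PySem

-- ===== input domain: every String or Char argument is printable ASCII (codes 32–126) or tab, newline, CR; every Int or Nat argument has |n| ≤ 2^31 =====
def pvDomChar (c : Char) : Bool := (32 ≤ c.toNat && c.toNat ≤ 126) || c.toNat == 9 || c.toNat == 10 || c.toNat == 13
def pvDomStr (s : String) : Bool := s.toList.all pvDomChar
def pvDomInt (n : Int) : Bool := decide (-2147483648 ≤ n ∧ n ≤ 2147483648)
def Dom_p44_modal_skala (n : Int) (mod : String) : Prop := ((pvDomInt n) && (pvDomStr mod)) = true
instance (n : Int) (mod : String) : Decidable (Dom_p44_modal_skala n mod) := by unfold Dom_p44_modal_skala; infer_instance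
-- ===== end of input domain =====

-- B replaces A's scale-table + per-element //,% arithmetic by a running-interval-sum
-- over the cyclic major step pattern [2,2,1,2,2,2,1] (objective: alternative algorithm, same cost).


-- ===== PORT A =====
-- the literal `modlar` dict and `modlar.get(mod, modlar["dorian"])`
def pvModlar : PySem.Dict String (List Int) := PySem.Dict.ofList
  [ ("ionian",     [0, 2, 4, 5, 7, 9, 11])
  , ("dorian",     [0, 2, 3, 5, 7, 9, 10])
  , ("phrygian",   [0, 1, 3, 5, 7, 8, 10])
  , ("lydian",     [0, 2, 4, 6, 7, 9, 11])
  , ("mixolydian", [0, 2, 4, 5, 7, 9, 10])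
  , ("aeolian",    [0, 2, 3, 5, 7, 8, 10])
  , ("locrian",    [0, 1, 3, 5, 6, 8, 10]) ]

def pvScale (mod : String) : List Int := (pvModlar.get? mod).getD [0, 2, 3, 5, 7, 9, 10]

-- for i in range(n): oktav = i // len(scale); yield scale[i % len(scale)] + 12 * oktav
-- (the index i % len(scale) is always in range, so pyGetD is exact here)
def p44_modal_skala (n : Int) (mod : String) : List Int :=
  let scale := pvScale mod
  (PySem.List.pyRange 0 n 1).foldl
    (fun acc i =>
      let oktav := PySem.Int.floordiv i (scale.length : Int)
      acc ++ [PySem.List.pyGetD scale (PySem.Int.mod i (scale.length : Int)) 0 + 12 * oktav])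
    []

-- ===== PORT B =====
-- the `starts` dict and `starts.get(mod, 1)`
def pvStarts : PySem.Dict String Int := PySem.Dict.ofList
  [ ("ionian", 0), ("dorian", 1), ("phrygian", 2), ("lydian", 3)
  , ("mixolydian", 4), ("aeolian", 5), ("locrian", 6) ]

def pvStart (mod : String) : Int := (pvStarts.get? mod).getD 1

-- steps = [2,2,1,2,2,2,1]
def pvSteps : List Int := [2, 2, 1, 2, 2, 2, 1]

-- while count < n: yield v; v += steps[j]; j += 1; if j == 7: j = 0; count += 1
-- (j stays in [0,7), so pyGetD is exact here)
def pvBLoop (n j v count : Int) (acc : List Int) : List Int :=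
  if h : count < n then
    let acc' := acc ++ [v]
    let v' := v + PySem.List.pyGetD pvSteps j 0
    let j1 := j + 1
    let j' := if j1 == 7 then 0 else j1
    pvBLoop n j' v' (count + 1) acc'
  else acc
termination_by (n - count).toNat
decreasing_by omega

def p44_modal_skala_alt (n : Int) (mod : String) : List Int :=
  pvBLoop n (pvStart mod) 0 0 []

-- ===== PRECONDITION & SPEC =====
def Spec_p44_modal_skala (n : Int) (mod : String) (out : List Int) : Prop := out = p44_modal_skala_alt n mod
instance (n : Int) (mod : String) (out : List Int) : Decidable (Spec_p44_modal_skala n mod out) := by unfold Spec_p44_modal_skala; infer_instance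

-- ===== CLAIM (what is proved, stated in full; the proofs are below) =====
def Claim_equal_p44_modal_skala : Prop := ∀ (n : Int) (mod : String), Dom_p44_modal_skala n mod → Spec_p44_modal_skala n mod (p44_modal_skala n mod)

-- ===== LEMMAS AND PROOFS =====

-- the value A yields at index i, for a given scale
def pvF (scale : List Int) (i : Int) : Int :=
  PySem.List.pyGetD scale (PySem.Int.mod i (scale.length : Int)) 0
    + 12 * PySem.Int.floordiv i (scale.length : Int)

-- the scale A looks up, indexed by B's start: rotation r of the major pattern
def pvRot (r : Int) : List Int :=
  if r = 0 then [0, 2, 4, 5, 7, 9, 11]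
  else if r = 1 then [0, 2, 3, 5, 7, 9, 10]
  else if r = 2 then [0, 1, 3, 5, 7, 8, 10]
  else if r = 3 then [0, 2, 4, 6, 7, 9, 11]
  else if r = 4 then [0, 2, 4, 5, 7, 9, 10]
  else if r = 5 then [0, 2, 3, 5, 7, 8, 10]
  else if r = 6 then [0, 1, 3, 5, 6, 8, 10]
  else [0, 2, 3, 5, 7, 9, 10]

theorem pvRot_length (r : Int) : (pvRot r).length = 7 := by
  unfold pvRot; split_ifs <;> rfl

theorem pvRot_zero (r : Int) : (pvRot r).getD 0 0 = 0 := by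
  unfold pvRot; split_ifs <;> rfl

theorem pvStart_bounds (mod : String) : 0 ≤ pvStart mod ∧ pvStart mod < 7 := by
  unfold pvStart pvStarts
  have h : PySem.Dict.ofList
      [ ("ionian", (0 : Int)), ("dorian", 1), ("phrygian", 2), ("lydian", 3)
      , ("mixolydian", 4), ("aeolian", 5), ("locrian", 6) ]
      = PySem.Dict.mk
      [ ("ionian", 0), ("dorian", 1), ("phrygian", 2), ("lydian", 3)
      , ("mixolydian", 4), ("aeolian", 5), ("locrian", 6) ] := by decide
  rw [h]
  simp only [PySem.Dict.get?_mk_cons]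
  split_ifs <;> simp [PySem.Dict.get?]

theorem pvScale_eq (mod : String) : pvScale mod = pvRot (pvStart mod) := by
  unfold pvScale pvStart pvModlar pvStarts
  have h1 : PySem.Dict.ofList
      [ ("ionian",     ([0, 2, 4, 5, 7, 9, 11] : List Int))
      , ("dorian",     [0, 2, 3, 5, 7, 9, 10])
      , ("phrygian",   [0, 1, 3, 5, 7, 8, 10])
      , ("lydian",     [0, 2, 4, 6, 7, 9, 11])
      , ("mixolydian", [0, 2, 4, 5, 7, 9, 10])
      , ("aeolian",    [0, 2, 3, 5, 7, 8, 10])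
      , ("locrian",    [0, 1, 3, 5, 6, 8, 10]) ]
      = PySem.Dict.mk
      [ ("ionian",     [0, 2, 4, 5, 7, 9, 11])
      , ("dorian",     [0, 2, 3, 5, 7, 9, 10])
      , ("phrygian",   [0, 1, 3, 5, 7, 8, 10])
      , ("lydian",     [0, 2, 4, 6, 7, 9, 11])
      , ("mixolydian", [0, 2, 4, 5, 7, 9, 10])
      , ("aeolian",    [0, 2, 3, 5, 7, 8, 10])
      , ("locrian",    [0, 1, 3, 5, 6, 8, 10]) ] := by decide
  have h2 : PySem.Dict.ofList
      [ ("ionian", (0 : Int)), ("dorian", 1), ("phrygian", 2), ("lydian", 3)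
      , ("mixolydian", 4), ("aeolian", 5), ("locrian", 6) ]
      = PySem.Dict.mk
      [ ("ionian", 0), ("dorian", 1), ("phrygian", 2), ("lydian", 3)
      , ("mixolydian", 4), ("aeolian", 5), ("locrian", 6) ] := by decide
  rw [h1, h2]
  simp only [PySem.Dict.get?_mk_cons]
  split_ifs <;> simp [PySem.Dict.get?, pvRot]

-- A = map of pvF over range(n)
theorem pvA_char (n : Int) (mod : String) :
    p44_modal_skala n mod = (PySem.List.pyRange 0 n 1).map (pvF (pvScale mod)) := by
  simp only [p44_modal_skala, PySem.List.foldl_append_singleton_eq_map, List.nil_append]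
  rfl

-- A's element in terms of Lean's % and / (nonnegative index)
theorem pvF_eq (r i : Int) (_hi : 0 ≤ i) :
    pvF (pvRot r) i = (pvRot r).getD ((i % 7).toNat) 0 + 12 * (i / 7) := by
  unfold pvF
  rw [pvRot_length]
  rw [PySem.Int.floordiv_eq_ediv_of_pos (by norm_num), PySem.Int.mod_eq_emod_of_pos (by norm_num)]
  conv_lhs => rw [show i % ((7 : Nat) : Int) = (((i % 7).toNat : Nat) : Int) by push_cast; omega]
  rw [PySem.List.pyGetD_natCast]
  norm_num

-- the one-step fact: rotating the step pattern advances the rotated scale by one degree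
theorem pvStepFact : ∀ (r m : Fin 7),
    (pvRot (r.val : Int)).getD ((m.val + 1) % 7) 0 + (if m.val = 6 then 12 else 0)
      = (pvRot (r.val : Int)).getD m.val 0 + pvSteps.getD ((r.val + m.val) % 7) 0 := by
  decide

-- characterisation of B's loop from an arbitrary reachable state
theorem pvLoop_char (n r i : Int) (hr0 : 0 ≤ r) (hr7 : r < 7) (hi : 0 ≤ i) (acc : List Int) :
    pvBLoop n ((r + i) % 7) ((pvRot r).getD ((i % 7).toNat) 0 + 12 * (i / 7)) i acc
      = acc ++ (PySem.List.pyRange i n 1).map (pvF (pvRot r)) := by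
  rw [pvBLoop]
  by_cases h : i < n
  · rw [dif_pos h]
    have hj : (if ((r + i) % 7 + 1) == 7 then (0 : Int) else (r + i) % 7 + 1)
        = (r + (i + 1)) % 7 := by
      rcases eq_or_ne ((r + i) % 7) 6 with h6 | h6
      · rw [if_pos (by simp [h6])]; omega
      · rw [if_neg (by simp [beq_iff_eq]; omega)]; omega
    have hmlt : (i % 7).toNat < 7 := by omega
    have hrlt : r.toNat < 7 := by omega
    have fact := pvStepFact ⟨r.toNat, hrlt⟩ ⟨(i % 7).toNat, hmlt⟩
    simp only [Int.toNat_of_nonneg hr0] at fact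
    have hsteps : PySem.List.pyGetD pvSteps ((r + i) % 7) 0
        = pvSteps.getD ((r.toNat + (i % 7).toNat) % 7) 0 := by
      have : (r + i) % 7 = (((r.toNat + (i % 7).toNat) % 7 : Nat) : Int) := by
        push_cast; omega
      rw [this, PySem.List.pyGetD_natCast]
    have hv : (pvRot r).getD ((i % 7).toNat) 0 + 12 * (i / 7)
          + PySem.List.pyGetD pvSteps ((r + i) % 7) 0
        = (pvRot r).getD (((i + 1) % 7).toNat) 0 + 12 * ((i + 1) / 7) := by
      rw [hsteps]
      rcases eq_or_ne ((i % 7).toNat) 6 with h6 | h6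
      · rw [if_pos h6] at fact
        have e1 : ((i + 1) % 7).toNat = ((i % 7).toNat + 1) % 7 := by omega
        have e2 : (i + 1) / 7 = i / 7 + 1 := by omega
        rw [e1, e2]; omega
      · rw [if_neg h6] at fact
        have e1 : ((i + 1) % 7).toNat = ((i % 7).toNat + 1) % 7 := by omega
        have e2 : (i + 1) / 7 = i / 7 := by omega
        rw [e1, e2]; omega
    simp only [hj, hv]
    rw [pvLoop_char n r (i + 1) hr0 hr7 (by omega)]
    rw [PySem.List.pyRange_one_cons h, List.map_cons, pvF_eq r i hi]
    simp
  · rw [dif_neg h]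
    rw [PySem.List.pyRange_one_eq_nil (by omega), List.map_nil, List.append_nil]
termination_by (n - i).toNat
decreasing_by omega

-- ===== VERDICT (by name: the statement is the Claim_ definition above) =====
theorem p44_modal_skala_spec : Claim_equal_p44_modal_skala := by
  intro n mod _
  unfold Spec_p44_modal_skala
  rw [pvA_char, pvScale_eq]
  show _ = pvBLoop n (pvStart mod) 0 0 []
  obtain ⟨h0, h7⟩ := pvStart_bounds mod
  have h := pvLoop_char n (pvStart mod) 0 h0 h7 le_rfl []
  have hr : (pvStart mod + 0) % 7 = pvStart mod := by omega
  have hzero : (pvRot (pvStart mod)).getD (((0 : Int) % 7).toNat) 0 + 12 * ((0 : Int) / 7) = 0 := by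
    simpa using pvRot_zero (pvStart mod)
  rw [hr, hzero] at h
  rw [h, List.nil_append]
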